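-- pv_equiv track=rewrite | github.com/nqvinh00/ComicDownloader | downloadComic - whith-thread.py | createComicFolder
-- ===== SOURCE A (Python) =====
-- def createComicFolder(url):
--     directory = "/Users/ACer/Desktop"
--     pos = 0
--     count = 0
--     for i in range(len(url)):
--         if url[i] == "/":
--             count += 1
--         if count == 4:
--             pos = i
--             break
--
--     for i in range(pos, len(url)):
--         directory += url[i]
--
--     return directory
-- ===== SOURCE B (Python) =====
-- def createComicFolder(url):
--     directory = "/Users/ACer/Desktop"
--     parts = url.split('/')
--     if len(parts) > 4:
--         return directory + '/' + '/'.join(parts[4:])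
--     return directory + url
-- ===== Notes on version B (the rewrite author's own statement) =====
-- stated objective: idiomatic
-- what changed: Replaces A's char-by-char index scan for the 4th slash plus a per-character string-append loop with a single split/slice/join decomposition (whole url kept when there are fewer than 4 slashes, matching A).
import Mathlib
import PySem

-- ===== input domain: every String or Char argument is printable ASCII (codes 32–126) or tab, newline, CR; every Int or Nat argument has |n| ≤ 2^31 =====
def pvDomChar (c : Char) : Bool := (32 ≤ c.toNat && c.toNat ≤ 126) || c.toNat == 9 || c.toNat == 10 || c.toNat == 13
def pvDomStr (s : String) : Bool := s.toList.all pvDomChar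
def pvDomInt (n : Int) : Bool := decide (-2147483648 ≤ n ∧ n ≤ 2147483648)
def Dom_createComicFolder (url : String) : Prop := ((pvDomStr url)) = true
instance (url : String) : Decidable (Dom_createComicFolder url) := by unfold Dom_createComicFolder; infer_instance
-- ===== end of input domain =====

-- B replaces A's char-by-char scan for the 4th slash with a split('/')/slice/join decomposition (idiomatic; same behaviour).

-- ===== PORT A =====
-- first loop of A: scan indices, count slashes, break (returning i) when count hits 4; pos stays 0 otherwise
def findPos4 (cs : List Char) (i pos count : Nat) : Nat :=
  if h : i < cs.length then
    let count' := if cs[i] == '/' then count + 1 else count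
    if count' == 4 then i else findPos4 cs (i + 1) pos count'
  else pos
termination_by cs.length - i

def createComicFolder (url : String) : String :=
  let cs := url.toList
  let pos := findPos4 cs 0 0 0
  -- second loop of A: for i in range(pos, len(url)): directory += url[i]
  let directory := (PySem.List.pyRange (pos : Int) ((cs.length : Nat) : Int) 1).foldl
      (fun d i => d ++ [PySem.List.pyGetD cs i ' ']) "/Users/ACer/Desktop".toList
  String.mk directory

-- ===== PORT B =====
def createComicFolder_alt (url : String) : String :=
  let parts := PySem.Chars.splitOn url.toList ['/']
  if 4 < parts.length then
    String.mk ("/Users/ACer/Desktop".toList ++ '/' :: PySem.Chars.join ['/'] (parts.drop 4))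
  else
    String.mk ("/Users/ACer/Desktop".toList ++ url.toList)

-- ===== PRECONDITION & SPEC =====
def Spec_createComicFolder (url : String) (out : String) : Prop := out = createComicFolder_alt url
instance (url : String) (out : String) : Decidable (Spec_createComicFolder url out) := by unfold Spec_createComicFolder; infer_instance

-- ===== CLAIM (what is proved, stated in full; the proofs are below) =====
def Claim_equal_createComicFolder : Prop := ∀ (url : String), Dom_createComicFolder url → Spec_createComicFolder url (createComicFolder url)

-- ===== LEMMAS AND PROOFS =====

-- structural single-char split (proof-side model of splitOn · ['/'])
def mySplit : List Char → List (List Char)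
  | [] => [[]]
  | c :: rest =>
    if c = '/' then [] :: mySplit rest
    else
      match mySplit rest with
      | [] => [[c]]
      | p :: ps => (c :: p) :: ps

-- proof-side model of '/'.join
def joinS : List (List Char) → List Char
  | [] => []
  | [p] => p
  | p :: q :: ps => p ++ '/' :: joinS (q :: ps)

def consHead (x : List Char) : List (List Char) → List (List Char)
  | [] => [x]
  | p :: ps => (x ++ p) :: ps

-- relative position of the slash at which the count reaches 4 (A's break point)
def sPos : List Char → Nat → Option Nat
  | [], _ => none
  | c :: rest, count =>
    if (if c = '/' then count + 1 else count) = 4 then some 0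
    else (sPos rest (if c = '/' then count + 1 else count)).map (· + 1)

theorem mySplit_ne_nil (cs : List Char) : mySplit cs ≠ [] := by
  cases cs with
  | nil => simp [mySplit]
  | cons c rest =>
    simp only [mySplit]
    split
    · simp
    · split <;> simp

theorem consHead_nil_of_ne_nil (ps : List (List Char)) (h : ps ≠ []) : consHead [] ps = ps := by
  cases ps with
  | nil => exact absurd rfl h
  | cons p ps => simp [consHead]

theorem go_eq_mySplit : ∀ (l : List Char) (fuel : Nat) (cur : List Char) (acc : List (List Char)),
    l.length < fuel →
    PySem.Chars.splitOn.go ['/'] fuel l cur acc = acc.reverse ++ consHead cur.reverse (mySplit l) := by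
  intro l
  induction l with
  | nil =>
    intro fuel cur acc h
    obtain ⟨f, rfl⟩ : ∃ f, fuel = f + 1 := ⟨fuel - 1, by omega⟩
    rw [PySem.Chars.splitOn.go]
    simp [mySplit, consHead]
    omega
  | cons c rest ih =>
    intro fuel cur acc h
    obtain ⟨f, rfl⟩ : ∃ f, fuel = f + 1 := ⟨fuel - 1, by omega⟩
    rw [PySem.Chars.splitOn.go]
    by_cases hc : c = '/'
    · subst hc
      have hpre : List.isPrefixOf ['/'] ('/' :: rest) = true := by
        simp [List.isPrefixOf]
      simp only [hpre, if_pos]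
      have hdrop : List.drop (['/'] : List Char).length ('/' :: rest) = rest := rfl
      rw [hdrop, ih f [] (cur.reverse :: acc) (by simp at h; omega)]
      rw [show ([] : List Char).reverse = [] from rfl,
        consHead_nil_of_ne_nil _ (mySplit_ne_nil rest)]
      simp [mySplit, consHead, List.append_assoc]
    · have hpre : List.isPrefixOf ['/'] (c :: rest) = false := by
        simp [List.isPrefixOf]
        intro hh; exact absurd hh.symm hc
      simp only [hpre, Bool.false_eq_true, if_neg, not_false_iff]
      rw [ih f (c :: cur) acc (by simp at h; omega)]
      simp only [List.reverse_cons, mySplit, if_neg hc]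
      cases hms : mySplit rest with
      | nil => exact absurd hms (mySplit_ne_nil rest)
      | cons p ps => simp [consHead, List.append_assoc]

theorem splitOn_eq_mySplit (cs : List Char) : PySem.Chars.splitOn cs ['/'] = mySplit cs := by
  show PySem.Chars.splitOn.go ['/'] (cs.length + 1) cs [] [] = mySplit cs
  rw [go_eq_mySplit cs (cs.length + 1) [] [] (Nat.lt_succ_self _)]
  simp [consHead_nil_of_ne_nil _ (mySplit_ne_nil cs)]

theorem join_eq_joinS (parts : List (List Char)) : PySem.Chars.join ['/'] parts = joinS parts := by
  induction parts with
  | nil => simp [PySem.Chars.join, joinS, List.intercalate]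
  | cons p ps ih =>
    cases ps with
    | nil => simp [PySem.Chars.join, joinS, List.intercalate]
    | cons q qs =>
      simp only [PySem.Chars.join, List.intercalate] at *
      simp only [joinS, ← ih]
      simp [List.intercalate]

theorem joinS_mySplit (cs : List Char) : joinS (mySplit cs) = cs := by
  induction cs with
  | nil => simp [mySplit, joinS]
  | cons c rest ih =>
    by_cases hc : c = '/'
    · simp only [mySplit, if_pos hc]
      cases hms : mySplit rest with
      | nil => exact absurd hms (mySplit_ne_nil rest)
      | cons p ps =>
        rw [hms] at ih
        show ([] : List Char) ++ '/' :: joinS (p :: ps) = c :: rest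
        simp [ih, hc]
    · simp only [mySplit, if_neg hc]
      cases hms : mySplit rest with
      | nil => exact absurd hms (mySplit_ne_nil rest)
      | cons p ps =>
        rw [hms] at ih
        cases ps with
        | nil => simp_all [joinS]
        | cons q qs => simp_all [joinS]

theorem sPos_none_length : ∀ (cs : List Char) (count : Nat), count < 4 →
    sPos cs count = none → (mySplit cs).length ≤ 4 - count := by
  intro cs
  induction cs with
  | nil => intro count _ _; simp [mySplit]; omega
  | cons c rest ih =>
    intro count hcount h
    by_cases hc : c = '/'
    · simp only [sPos, if_pos hc] at h
      by_cases h4 : count + 1 = 4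
      · simp [h4] at h
      · rw [if_neg h4, Option.map_eq_none_iff] at h
        have := ih (count + 1) (by omega) h
        simp only [mySplit, if_pos hc, List.length_cons]
        omega
    · simp only [sPos, if_neg hc] at h
      have h4 : ¬ count = 4 := by omega
      rw [if_neg h4, Option.map_eq_none_iff] at h
      have := ih count hcount h
      simp only [mySplit, if_neg hc]
      cases hms : mySplit rest with
      | nil => exact absurd hms (mySplit_ne_nil rest)
      | cons p ps => rw [hms] at this; simpa using this

theorem sPos_some_drop : ∀ (cs : List Char) (count j : Nat), count < 4 →
    sPos cs count = some j →
    4 - count < (mySplit cs).length ∧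
      cs.drop j = '/' :: joinS ((mySplit cs).drop (4 - count)) := by
  intro cs
  induction cs with
  | nil => intro count j _ h; simp [sPos] at h
  | cons c rest ih =>
    intro count j hcount h
    by_cases hc : c = '/'
    · simp only [sPos, if_pos hc] at h
      by_cases h4 : count + 1 = 4
      · rw [if_pos h4] at h
        have hj : j = 0 := by simpa using h.symm
        subst hj
        have hcnt : count = 3 := by omega
        subst hcnt
        refine ⟨?_, ?_⟩
        · simp only [mySplit, if_pos hc, List.length_cons]
          have : 0 < (mySplit rest).length := List.length_pos_iff.mpr (mySplit_ne_nil rest)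
          omega
        · simp [mySplit, if_pos hc, hc, joinS_mySplit rest]
      · rw [if_neg h4] at h
        obtain ⟨j', hj', rfl⟩ := Option.map_eq_some_iff.mp h
        obtain ⟨hlen, hdrop⟩ := ih (count + 1) j' (by omega) hj'
        simp only [mySplit, if_pos hc, List.length_cons]
        have hsub : 4 - count = (4 - (count + 1)) + 1 := by omega
        constructor
        · omega
        · rw [hsub]
          simpa using hdrop
    · simp only [sPos, if_neg hc] at h
      have h4 : ¬ count = 4 := by omega
      rw [if_neg h4] at h
      obtain ⟨j', hj', rfl⟩ := Option.map_eq_some_iff.mp h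
      obtain ⟨hlen, hdrop⟩ := ih count j' hcount hj'
      simp only [mySplit, if_neg hc]
      cases hms : mySplit rest with
      | nil => exact absurd hms (mySplit_ne_nil rest)
      | cons p ps =>
        rw [hms] at hlen hdrop
        obtain ⟨k, hk⟩ : ∃ k, 4 - count = k + 1 := ⟨3 - count, by omega⟩
        rw [hk] at hdrop ⊢
        simp only [List.length_cons] at hlen ⊢
        constructor
        · omega
        · simp only [List.drop_succ_cons] at hdrop ⊢
          simpa using hdrop

theorem findPos4_eq_sPos : ∀ (l cs : List Char) (i count : Nat), cs.drop i = l →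
    findPos4 cs i 0 count = (match sPos l count with | some j => i + j | none => 0) := by
  intro l
  induction l with
  | nil =>
    intro cs i count hdrop
    have hi : ¬ i < cs.length := by
      intro hlt
      have := List.length_drop (l := cs) (i := i)
      rw [hdrop] at this
      simp at this
      omega
    rw [findPos4, dif_neg hi]
    simp [sPos]
  | cons c rest ih =>
    intro cs i count hdrop
    have hi : i < cs.length := by
      by_contra hge
      rw [List.drop_eq_nil_of_le (by omega)] at hdrop
      simp at hdrop
    have hgi : cs[i] = c := by
      have h0 : (cs.drop i)[0]? = some c := by rw [hdrop]; rfl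
      rw [List.getElem?_drop] at h0
      simp only [Nat.add_zero] at h0
      exact Option.some.inj ((List.getElem?_eq_getElem hi).symm.trans h0)
    have hdrop' : cs.drop (i + 1) = rest := by
      have h1 : (cs.drop i).drop 1 = rest := by rw [hdrop]; simp
      rwa [List.drop_drop] at h1
    rw [findPos4, dif_pos hi]
    simp only [hgi, sPos]
    by_cases hc : c = '/'
    · have hcb : ((c == '/') = true) := by simpa using hc
      rw [hcb]
      simp only [if_true, if_pos hc]
      by_cases h4 : count + 1 = 4
      · simp [h4]
      · have h4b : ((count + 1 == 4) = false) := by simpa using h4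
        rw [h4b]
        simp only [Bool.false_eq_true, if_neg, not_false_iff, if_neg h4]
        rw [ih cs (i + 1) (count + 1) hdrop']
        cases sPos rest (count + 1) with
        | none => simp
        | some j' =>
          simp
          exact (Nat.add_assoc i 1 j').trans (congrArg (i + ·) (Nat.add_comm 1 j'))
    · have hcb : ((c == '/') = false) := by simpa using hc
      rw [hcb]
      simp only [Bool.false_eq_true, if_neg, not_false_iff, if_neg hc]
      by_cases h4 : count = 4
      · simp [h4]
      · have h4b : ((count == 4) = false) := by simpa using h4
        rw [h4b]
        simp only [Bool.false_eq_true, if_neg, not_false_iff, if_neg h4]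
        rw [ih cs (i + 1) count hdrop']
        cases sPos rest count with
        | none => simp
        | some j' =>
          simp
          exact (Nat.add_assoc i 1 j').trans (congrArg (i + ·) (Nat.add_comm 1 j'))

theorem foldl_append_singleton (l : List Char) : ∀ (init : List Char),
    l.foldl (fun a c => a ++ [c]) init = init ++ l := by
  induction l with
  | nil => intro init; simp
  | cons c rest ih => intro init; simp [List.foldl_cons, ih, List.append_assoc]

theorem createComicFolder_eq_drop (url : String) :
    createComicFolder url =
      String.mk ("/Users/ACer/Desktop".toList ++ url.toList.drop (findPos4 url.toList 0 0 0)) := by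
  show String.mk ((PySem.List.pyRange ((findPos4 url.toList 0 0 0 : Nat) : Int)
      ((url.toList.length : Nat) : Int) 1).foldl
      (fun d i => d ++ [PySem.List.pyGetD url.toList i ' ']) "/Users/ACer/Desktop".toList) = _
  rw [PySem.List.foldl_pyRange_pyGetD' url.toList ' ' (fun a c => a ++ [c])
    "/Users/ACer/Desktop".toList (Int.natCast_nonneg _)]
  rw [foldl_append_singleton]
  simp

-- ===== VERDICT (by name: the statement is the Claim_ definition above) =====
theorem createComicFolder_spec : Claim_equal_createComicFolder := by
  intro url _
  show createComicFolder url = createComicFolder_alt url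
  rw [createComicFolder_eq_drop]
  simp only [createComicFolder_alt, splitOn_eq_mySplit, join_eq_joinS]
  have hfind := findPos4_eq_sPos url.toList url.toList 0 0 (by simp)
  cases hs : sPos url.toList 0 with
  | none =>
    rw [hs] at hfind
    have hlen := sPos_none_length url.toList 0 (by omega) hs
    rw [if_neg (by omega)]
    rw [hfind]
    simp
  | some j =>
    rw [hs] at hfind
    obtain ⟨hlen, hdrop⟩ := sPos_some_drop url.toList 0 j (by omega) hs
    rw [if_pos (by omega)]
    rw [hfind]
    simp only [Nat.zero_add]
    rw [hdrop]
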